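-- pv_equiv track=rewrite | github.com/AkumaEX/beecrowd | AD-HOC/2451/main.py | get_max_food
-- ===== SOURCE A (Python) =====
-- def get_max_food(n, maze):
--     max_food = 0
--     food = 0
--     for i in range(n):
--         for j in range(n):
--             position = maze[i][j if i % 2 == 0 else n - 1 - j]
--             if position == 'o':
--                 food += 1
--             elif position == 'A':
--                 if food > max_food:
--                     max_food = food
--                 food = 0
--     return food if food > max_food else max_food
-- ===== SOURCE B (Python) =====
-- def get_max_food(n, maze):
--     path = ''.join(maze[i][:n] if i % 2 == 0 else maze[i][:n][::-1] for i in range(n))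
--     return max(seg.count('o') for seg in path.split('A'))
-- ===== Notes on version B (the rewrite author's own statement) =====
-- stated objective: simpler
-- what changed: Replaces the nested index loops carrying a running counter with reset-on-'A' by building the snake-order path string once (row or reversed row prefix per row), splitting it on 'A', and taking the max of 'o'-counts per segment.
import Mathlib
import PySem

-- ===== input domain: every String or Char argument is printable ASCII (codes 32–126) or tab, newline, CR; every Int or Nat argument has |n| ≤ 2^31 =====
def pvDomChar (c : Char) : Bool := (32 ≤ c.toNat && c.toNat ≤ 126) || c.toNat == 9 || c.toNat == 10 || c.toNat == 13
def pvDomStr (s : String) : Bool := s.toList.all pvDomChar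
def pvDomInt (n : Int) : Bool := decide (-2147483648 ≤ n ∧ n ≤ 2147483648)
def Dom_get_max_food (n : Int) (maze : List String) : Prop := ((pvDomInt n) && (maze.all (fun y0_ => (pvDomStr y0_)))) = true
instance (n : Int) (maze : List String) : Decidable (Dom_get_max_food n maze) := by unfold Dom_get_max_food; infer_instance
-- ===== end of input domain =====

-- B replaces A's nested index loops with a reset-on-'A' counter by a build-then-aggregate
-- decomposition: build the snake-order path string, split it on 'A', take the max 'o'-count
-- per segment (objective: simpler).

-- ===== PORT A =====
def get_max_food (n : Int) (maze : List String) : Int :=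
  let st :=
    (PySem.List.pyRange 0 n 1).foldl (fun (st : Int × Int) i =>
      (PySem.List.pyRange 0 n 1).foldl (fun (st : Int × Int) j =>
        let position := (PySem.Str.pyGet? ((PySem.List.pyGet? maze i).getD "")
            (if PySem.Int.mod i 2 = 0 then j else n - 1 - j)).getD ' '
        if position = 'o' then (st.1, st.2 + 1)
        else if position = 'A' then ((if st.2 > st.1 then st.2 else st.1), 0)
        else st) st) ((0 : Int), (0 : Int))
  if st.2 > st.1 then st.2 else st.1

-- ===== PORT B =====
def get_max_food_alt (n : Int) (maze : List String) : Int :=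
  let path := PySem.Str.join "" ((PySem.List.pyRange 0 n 1).map (fun i =>
      let pre := PySem.Str.slice ((PySem.List.pyGet? maze i).getD "") none (some n)
      if PySem.Int.mod i 2 = 0 then pre else (PySem.Str.slice? pre none none (-1)).getD ""))
  let counts := ((PySem.Str.split? path "A").getD []).map
      (fun seg => (PySem.Str.count seg "o" : Int))
  (PySem.List.max? counts id).getD 0

-- ===== PRECONDITION & SPEC =====
-- A raises IndexError unless the first n rows exist and each has at least n characters.
def Pre_get_max_food (n : Int) (maze : List String) : Prop :=
  n ≤ (maze.length : Int) ∧ ∀ s ∈ maze.take n.toNat, n ≤ (s.toList.length : Int)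
instance (n : Int) (maze : List String) : Decidable (Pre_get_max_food n maze) := by
  unfold Pre_get_max_food; infer_instance

def pvWitness_get_max_food : Int × List String := (2, ["oA", "oo"])

def Spec_get_max_food (n : Int) (maze : List String) (out : Int) : Prop := out = get_max_food_alt n maze
instance (n : Int) (maze : List String) (out : Int) : Decidable (Spec_get_max_food n maze out) := by unfold Spec_get_max_food; infer_instance

-- ===== CLAIM (what is proved, stated in full; the proofs are below) =====
def Claim_equal_get_max_food : Prop := ∀ (n : Int) (maze : List String), Dom_get_max_food n maze → Pre_get_max_food n maze → Spec_get_max_food n maze (get_max_food n maze)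

-- ===== LEMMAS AND PROOFS =====

def resIf (st : Int × Int) : Int := if st.2 > st.1 then st.2 else st.1

theorem resIf_eq_max (st : Int × Int) : resIf st = max st.1 st.2 := by
  rw [resIf, max_def]; split_ifs <;> omega

-- the body of A's inner loop, as a step over the character actually read
def stepA (st : Int × Int) (c : Char) : Int × Int :=
  if c = 'o' then (st.1, st.2 + 1)
  else if c = 'A' then ((if st.2 > st.1 then st.2 else st.1), 0)
  else st

-- 'A'-separated segments of a character list (= Python str.split('A') on the char level)
def segsOf : List Char → List (List Char)
  | [] => [[]]
  | c :: rest => if c = 'A' then [] :: segsOf rest else (segsOf rest).modifyHead (fun s => c :: s)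

def countsOf (cs : List Char) : List Int := (segsOf cs).map (fun s => (s.count 'o' : Int))

-- food pending from the current (first) segment is added to its count
def addF (f : Int) : List Int → List Int
  | [] => [f]
  | x :: xs => (f + x) :: xs

-- the character A reads for row i at inner step k, and the chunk a whole row contributes
def chunkOf (n : Int) (maze : List String) (i : Int) : List Char :=
  let cs := ((PySem.List.pyGet? maze i).getD "").toList
  if PySem.Int.mod i 2 = 0 then cs.take n.toNat else (cs.take n.toNat).reverse

theorem segsOf_ne_nil (cs : List Char) : segsOf cs ≠ [] := by
  cases cs with
  | nil => simp [segsOf]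
  | cons c rest =>
    simp only [segsOf]
    split <;> simp
    cases h : segsOf rest with
    | nil => exact absurd h (segsOf_ne_nil rest)
    | cons a l => simp

theorem countsOf_ne_nil (cs : List Char) : countsOf cs ≠ [] := by
  simp [countsOf, segsOf_ne_nil]

theorem countsOf_nonneg (cs : List Char) : ∀ x ∈ countsOf cs, 0 ≤ x := by
  intro x hx
  simp only [countsOf, List.mem_map] at hx
  obtain ⟨s, -, rfl⟩ := hx
  positivity

theorem addF_zero (K : List Int) (h : K ≠ []) : addF 0 K = K := by
  cases K with
  | nil => exact absurd rfl h
  | cons x xs => simp [addF]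

theorem foldl_max_max (l : List Int) (a : Int) : ∀ b, l.foldl max (max a b) = max a (l.foldl max b) := by
  induction l with
  | nil => intro b; simp
  | cons x xs ih =>
    intro b
    simp only [List.foldl_cons, max_assoc]
    exact ih (max b x)

theorem le_foldl_max (l : List Int) : ∀ a : Int, a ≤ l.foldl max a := by
  induction l with
  | nil => intro a; simp
  | cons x xs ih => intro a; exact le_trans (le_max_left a x) (ih (max a x))

theorem addF_countsOf_cons (c : Char) (rest : List Char) (hc : c ≠ 'A') (f : Int) :
    addF f (countsOf (c :: rest)) = addF (f + (if c = 'o' then 1 else 0)) (countsOf rest) := by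
  cases h : segsOf rest with
  | nil => exact absurd h (segsOf_ne_nil rest)
  | cons s ss =>
    simp only [countsOf, segsOf, if_neg hc, h, List.modifyHead, List.map_cons, addF,
      List.count_cons]
    by_cases hco : c = 'o' <;> simp [hco] <;> push_cast <;> ring_nf

-- MAIN invariant of A's pass: its running (max_food, food) result equals
-- max of the initial max_food and the per-segment counts (pending food added to the first).
theorem mainA (cs : List Char) : ∀ (mx f : Int), 0 ≤ f →
    resIf (cs.foldl stepA (mx, f)) = max mx ((addF f (countsOf cs)).foldl max 0) := by
  induction cs with
  | nil =>
    intro mx f hf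
    simp only [List.foldl_nil, countsOf, segsOf, List.map_cons, List.map_nil, addF,
      List.foldl_cons, List.foldl_nil, resIf_eq_max]
    simp only [List.count_nil, Nat.cast_zero, add_zero]
    omega
  | cons c rest ih =>
    intro mx f hf
    by_cases hA : c = 'A'
    · subst hA
      have hstep : stepA (mx, f) 'A' = (max mx f, 0) := by
        simp only [stepA, if_neg (by decide : ¬('A' = 'o')), if_pos rfl]
        have h : (if f > mx then f else mx) = max mx f := by rw [max_def]; split_ifs <;> omega
        simp [h]
      rw [List.foldl_cons, hstep, ih (max mx f) 0 le_rfl]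
      rw [addF_zero _ (countsOf_ne_nil rest)]
      have h1 : countsOf ('A' :: rest) = 0 :: countsOf rest := by
        simp [countsOf, segsOf]
      rw [h1]
      simp only [addF, add_zero, List.foldl_cons]
      rw [max_comm (0:Int) f, foldl_max_max, max_assoc]
    · have hstep : stepA (mx, f) c = (mx, f + (if c = 'o' then 1 else 0)) := by
        by_cases hco : c = 'o' <;> simp [stepA, hco, hA]
      rw [List.foldl_cons, hstep, ih mx _ (by positivity), addF_countsOf_cons c rest hA]

-- innermost reduction, even rows: indices 0,1,…,m-1
theorem evenFold (cs : List Char) : ∀ (m : Nat), m ≤ cs.length → ∀ init : Int × Int,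
    (List.range m).foldl (fun st k => stepA st (cs.getD k ' ')) init
      = (cs.take m).foldl stepA init := by
  intro m
  induction m with
  | zero => intro _ init; simp
  | succ m ih =>
    intro hm init
    rw [List.range_succ, List.foldl_append, ih (by omega), List.take_succ]
    have hgm : cs[m]? = some cs[m] := List.getElem?_eq_getElem (by omega)
    rw [hgm, List.foldl_append]
    simp [List.getD, hgm]

-- innermost reduction, odd rows: indices m-1,m-2,…,0 visit the reversed prefix
theorem oddFold (cs : List Char) : ∀ (m : Nat), m ≤ cs.length → ∀ init : Int × Int,
    (List.range m).foldl (fun st k => stepA st (cs.getD (m - 1 - k) ' ')) init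
      = ((cs.take m).reverse).foldl stepA init := by
  intro m
  induction m with
  | zero => intro _ init; simp
  | succ m ih =>
    intro hm init
    rw [List.range_succ_eq_map, List.foldl_cons, List.foldl_map]
    have hbody : (List.range m).foldl
        (fun st k => stepA st (cs.getD (m + 1 - 1 - Nat.succ k) ' ')) (stepA init (cs.getD (m + 1 - 1 - 0) ' '))
        = (List.range m).foldl (fun st k => stepA st (cs.getD (m - 1 - k) ' '))
            (stepA init (cs.getD m ' ')) := by
      apply PySem.List.foldl_congr_mem
      intro acc k _
      rw [show m + 1 - 1 - Nat.succ k = m - 1 - k by omega]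
    have hgm : cs[m]? = some cs[m] := List.getElem?_eq_getElem (by omega)
    rw [hbody, ih (by omega), List.take_succ, hgm]
    have hget : cs.getD m ' ' = cs[m] := by simp [List.getD, hgm]
    rw [hget]
    simp only [Option.toList_some, List.foldl_reverse, List.foldr_append, List.foldr_cons,
      List.foldr_nil]

-- generic outer glue: if each inner pass folds stepA over its chunk, the whole nest
-- folds stepA over the concatenation of the chunks
theorem foldl_flatten {β : Type} (f : (Int × Int) → Char → (Int × Int))
    (inner : (Int × Int) → β → (Int × Int)) (g : β → List Char) :
    ∀ (is : List β), (∀ i ∈ is, ∀ st, inner st i = (g i).foldl f st) →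
      ∀ st, is.foldl inner st = ((is.map g).flatten).foldl f st := by
  intro is
  induction is with
  | nil => intro _ st; simp
  | cons i rest ih =>
    intro h st
    simp only [List.foldl_cons, List.map_cons, List.flatten_cons, List.foldl_append]
    rw [h i (by simp) st]
    exact ih (fun j hj => h j (by simp [hj])) _

-- Chars.join with empty separator is flatten
theorem join_nil_eq_flatten : ∀ parts : List (List Char), PySem.Chars.join [] parts = parts.flatten := by
  intro parts
  induction parts with
  | nil => rfl
  | cons p rest ih =>
    cases rest with
    | nil => simp [PySem.Chars.join_singleton]
    | cons q qs =>
      rw [PySem.Chars.join_cons_cons, ih]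
      simp

-- character-level split on 'A' is segsOf
theorem splitOnGo_eq : ∀ (l : List Char) (fuel : Nat), l.length ≤ fuel → ∀ (cur : List Char) (acc : List (List Char)),
    PySem.Chars.splitOn.go ['A'] fuel l cur acc
      = acc.reverse ++ (segsOf l).modifyHead (fun s => cur.reverse ++ s) := by
  intro l
  induction l with
  | nil =>
    intro fuel _ cur acc
    cases fuel <;> simp [PySem.Chars.splitOn.go, segsOf]
  | cons c rest ih =>
    intro fuel hf cur acc
    cases fuel with
    | zero => simp at hf
    | succ f =>
      by_cases hA : c = 'A'
      · subst hA
        rw [show PySem.Chars.splitOn.go ['A'] (f+1) ('A' :: rest) cur acc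
            = PySem.Chars.splitOn.go ['A'] f rest [] (cur.reverse :: acc) from by
          simp [PySem.Chars.splitOn.go, List.isPrefixOf]]
        rw [ih f (by simpa using hf) [] (cur.reverse :: acc)]
        cases h : segsOf rest with
        | nil => exact absurd h (segsOf_ne_nil rest)
        | cons s ss => simp [segsOf, h]
      · rw [show PySem.Chars.splitOn.go ['A'] (f+1) (c :: rest) cur acc
            = PySem.Chars.splitOn.go ['A'] f rest (c :: cur) acc from by
          simp [PySem.Chars.splitOn.go, List.isPrefixOf, (by simpa using Ne.symm hA : ¬('A' == c) = true)]]
        rw [ih f (by simpa using hf) (c :: cur) acc]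
        cases h : segsOf rest with
        | nil => exact absurd h (segsOf_ne_nil rest)
        | cons s ss => simp [segsOf, hA, h, List.modifyHead]

theorem splitOn_A_eq (cs : List Char) : PySem.Chars.splitOn cs ['A'] = segsOf cs := by
  rw [PySem.Chars.splitOn, splitOnGo_eq cs (cs.length + 1) (by omega) [] []]
  cases h : segsOf cs with
  | nil => exact absurd h (segsOf_ne_nil cs)
  | cons s ss => simp

-- character-level count of 'o'
theorem countGo_eq : ∀ (l : List Char) (fuel : Nat), l.length ≤ fuel → ∀ acc : Nat,
    PySem.Chars.count.go ['o'] fuel l acc = acc + l.count 'o' := by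
  intro l
  induction l with
  | nil => intro fuel _ acc; cases fuel <;> simp [PySem.Chars.count.go]
  | cons c rest ih =>
    intro fuel hf acc
    cases fuel with
    | zero => simp at hf
    | succ f =>
      by_cases hc : c = 'o'
      · subst hc
        rw [show PySem.Chars.count.go ['o'] (f+1) ('o' :: rest) acc
            = PySem.Chars.count.go ['o'] f rest (acc + 1) from by
          simp [PySem.Chars.count.go, List.isPrefixOf]]
        rw [ih f (by simpa using hf) (acc + 1)]
        simp [List.count_cons]
        omega
      · rw [show PySem.Chars.count.go ['o'] (f+1) (c :: rest) acc
            = PySem.Chars.count.go ['o'] f rest acc from by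
          simp [PySem.Chars.count.go, List.isPrefixOf, (by simpa using Ne.symm hc : ¬('o' == c) = true)]]
        rw [ih f (by simpa using hf) acc]
        simp [List.count_cons, hc]

theorem count_o_eq (cs : List Char) : PySem.Chars.count cs ['o'] = cs.count 'o' := by
  rw [PySem.Chars.count]
  simp [countGo_eq cs cs.length le_rfl 0]

-- Python max(list) via PySem.List.max?
theorem max?_getD_eq_foldl (l : List Int) (h : l ≠ []) (hpos : ∀ x ∈ l, 0 ≤ x) :
    (PySem.List.max? l id).getD 0 = l.foldl max 0 := by
  cases l with
  | nil => exact absurd rfl h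
  | cons x xs =>
    rw [PySem.List.max?]
    simp only [List.foldl_cons]
    rw [max_eq_right (hpos x (by simp))]
    clear h hpos
    induction xs generalizing x with
    | nil => rfl
    | cons y ys ih =>
      simp only [List.foldl_cons, id]
      by_cases hxy : x < y
      · rw [if_pos hxy, max_eq_right hxy.le]
        exact ih y
      · rw [if_neg hxy, max_eq_left (by omega)]
        exact ih x

-- the central fact: A's pass over a character list equals B's split-and-max aggregate
theorem coreEq (cs : List Char) :
    resIf (cs.foldl stepA (0, 0)) = (PySem.List.max? (countsOf cs) id).getD 0 := by
  rw [mainA cs 0 0 le_rfl, addF_zero _ (countsOf_ne_nil cs),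
      max?_getD_eq_foldl _ (countsOf_ne_nil cs) (countsOf_nonneg cs)]
  exact max_eq_right (le_foldl_max (countsOf cs) 0)

-- A's inner loop over row i folds stepA over that row's chunk
theorem innerA (n : Int) (maze : List String) (i : Int)
    (h0 : 0 ≤ i) (hin : i < n)
    (hrow : n ≤ ((((PySem.List.pyGet? maze i).getD "").toList.length : Int))) :
    ∀ st : Int × Int,
      (PySem.List.pyRange 0 n 1).foldl (fun (st : Int × Int) j =>
        let position := (PySem.Str.pyGet? ((PySem.List.pyGet? maze i).getD "")
            (if PySem.Int.mod i 2 = 0 then j else n - 1 - j)).getD ' '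
        if position = 'o' then (st.1, st.2 + 1)
        else if position = 'A' then ((if st.2 > st.1 then st.2 else st.1), 0)
        else st) st = (chunkOf n maze i).foldl stepA st := by
  intro st
  have hn0 : 0 ≤ n := by omega
  set row := (PySem.List.pyGet? maze i).getD "" with hrowdef
  set cs := row.toList with hcs
  have hm : n.toNat ≤ cs.length := by omega
  rw [PySem.List.pyRange_one, List.foldl_map]
  simp only [sub_zero, zero_add]
  by_cases hpar : PySem.Int.mod i 2 = 0
  · rw [PySem.List.foldl_congr_mem _ _ (fun (st : Int × Int) k => stepA st (cs.getD k ' ')) st ?_]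
    · rw [evenFold cs n.toNat hm st, chunkOf, if_pos hpar]
    · intro acc k _
      have hb : (PySem.Str.pyGet? row ((k : Nat) : Int)).getD ' ' = cs.getD k ' ' := by
        rw [PySem.Str.pyGet?_natCast, ← hcs]
        simp [List.getD]
      simp only [if_pos hpar, hb]
      rfl
  · rw [PySem.List.foldl_congr_mem _ _
        (fun (st : Int × Int) k => stepA st (cs.getD (n.toNat - 1 - k) ' ')) st ?_]
    · rw [oddFold cs n.toNat hm st, chunkOf, if_neg hpar]
    · intro acc k hk
      have hklt : k < n.toNat := by
        have := List.mem_range.mp hk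
        omega
      have h0' : 0 ≤ n - 1 - (k : Int) := by omega
      have hb : (PySem.Str.pyGet? row (n - 1 - (k : Nat))).getD ' ' = cs.getD (n.toNat - 1 - k) ' ' := by
        rw [PySem.Str.pyGet?_eq, PySem.Chars.pyGet?_eq_listPyGet?, ← hcs,
          PySem.List.pyGet?_of_nonneg cs h0',
          show (n - 1 - (k : Int)).toNat = n.toNat - 1 - k from by omega]
        simp [List.getD]
      simp only [if_neg hpar, hb]
      rfl

-- ===== VERDICT (by name: the statement is the Claim_ definition above) =====
theorem get_max_food_spec : Claim_equal_get_max_food := by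
  unfold Claim_equal_get_max_food
  intro n maze _ hpre
  obtain ⟨hlen, hrows⟩ := hpre
  unfold Spec_get_max_food get_max_food get_max_food_alt
  -- each row admitted by the range satisfies the per-row bound
  have hrowlen : ∀ i ∈ PySem.List.pyRange 0 n 1,
      n ≤ ((((PySem.List.pyGet? maze i).getD "").toList.length : Int)) := by
    intro i hi
    obtain ⟨h0, hin⟩ := (PySem.List.mem_pyRange_one).mp hi
    have hit : i.toNat < maze.length := by omega
    have hg : PySem.List.pyGet? maze i = some maze[i.toNat] := by
      rw [PySem.List.pyGet?_of_nonneg maze h0, List.getElem?_eq_getElem hit]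
    rw [hg, Option.getD_some]
    refine hrows _ ?_
    have h3 : i.toNat < (maze.take n.toNat).length := by
      simp only [List.length_take]
      omega
    have h4 : (maze.take n.toNat)[i.toNat]'h3 = maze[i.toNat] := List.getElem_take
    rw [← h4]
    exact List.getElem_mem h3
  -- A's nest folds stepA over the concatenated chunks
  have hA : (PySem.List.pyRange 0 n 1).foldl (fun (st : Int × Int) i =>
        (PySem.List.pyRange 0 n 1).foldl (fun (st : Int × Int) j =>
          let position := (PySem.Str.pyGet? ((PySem.List.pyGet? maze i).getD "")
              (if PySem.Int.mod i 2 = 0 then j else n - 1 - j)).getD ' '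
          if position = 'o' then (st.1, st.2 + 1)
          else if position = 'A' then ((if st.2 > st.1 then st.2 else st.1), 0)
          else st) st) ((0 : Int), (0 : Int))
      = (((PySem.List.pyRange 0 n 1).map (chunkOf n maze)).flatten).foldl stepA (0, 0) := by
    refine foldl_flatten stepA _ (chunkOf n maze) (PySem.List.pyRange 0 n 1) ?_ (0, 0)
    intro i hi st
    obtain ⟨h0, hin⟩ := (PySem.List.mem_pyRange_one).mp hi
    exact innerA n maze i h0 hin (hrowlen i hi) st
  -- B's path spells out the same concatenated chunks
  have hpath : (PySem.Str.join "" ((PySem.List.pyRange 0 n 1).map (fun i =>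
        let pre := PySem.Str.slice ((PySem.List.pyGet? maze i).getD "") none (some n)
        if PySem.Int.mod i 2 = 0 then pre
        else (PySem.Str.slice? pre none none (-1)).getD ""))).toList
      = ((PySem.List.pyRange 0 n 1).map (chunkOf n maze)).flatten := by
    rw [PySem.Str.toList_join, show ("" : String).toList = [] from rfl, join_nil_eq_flatten,
      List.map_map]
    congr 1
    refine List.map_congr_left ?_
    intro i hi
    obtain ⟨h0, hin⟩ := (PySem.List.mem_pyRange_one).mp hi
    have hn0 : (0 : Int) ≤ n := by omega
    have hpre : (PySem.Str.slice ((PySem.List.pyGet? maze i).getD "") none (some n)).toList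
        = ((PySem.List.pyGet? maze i).getD "").toList.take n.toNat := by
      rw [PySem.Str.toList_slice, PySem.Chars.slice_eq_listSlice, PySem.List.slice_to _ hn0]
    by_cases hpar : PySem.Int.mod i 2 = 0
    · simp only [Function.comp, if_pos hpar, chunkOf, hpre]
    · simp only [Function.comp, if_neg hpar, chunkOf, PySem.Str.slice?_none_none_neg_one,
        Option.getD_some, String.toList_ofList, hpre]
  have hpath' : (PySem.Str.join "" ((PySem.List.pyRange 0 n 1).map (fun i =>
        let pre := PySem.Str.slice ((PySem.List.pyGet? maze i).getD "") none (some n)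
        if PySem.Int.mod i 2 = 0 then pre
        else (PySem.Str.slice? pre none none (-1)).getD "")))
      = String.ofList (((PySem.List.pyRange 0 n 1).map (chunkOf n maze)).flatten) := by
    apply String.toList_inj.mp
    rw [hpath, String.toList_ofList]
  rw [hA, hpath']
  set cs := ((PySem.List.pyRange 0 n 1).map (chunkOf n maze)).flatten with hcsdef
  -- the split of the path is segsOf, its 'o'-counts are countsOf
  have h1 : Option.map (List.map String.toList)
      (PySem.Str.split? (String.ofList cs) "A") = some (segsOf cs) := by
    rw [PySem.Str.split?_map, show ("A" : String).toList = ['A'] from rfl,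
      String.toList_ofList, PySem.Chars.split?]
    simp [splitOn_A_eq]
  have hcounts : ((PySem.Str.split? (String.ofList cs) "A").getD []).map
      (fun seg => (PySem.Str.count seg "o" : Int)) = countsOf cs := by
    cases hs : PySem.Str.split? (String.ofList cs) "A" with
    | none => rw [hs] at h1; simp at h1
    | some segs =>
      rw [hs] at h1
      simp only [Option.map_some, Option.some.injEq] at h1
      rw [Option.getD_some]
      calc segs.map (fun seg => (PySem.Str.count seg "o" : Int))
          = (segs.map String.toList).map (fun t => (t.count 'o' : Int)) := by
            rw [List.map_map]
            refine List.map_congr_left ?_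
            intro seg _
            rw [Function.comp_apply, PySem.Str.count_eq,
              show ("o" : String).toList = ['o'] from rfl, count_o_eq]
        _ = countsOf cs := by rw [h1]; rfl
  show resIf (cs.foldl stepA (0, 0))
      = (PySem.List.max? (((PySem.Str.split? (String.ofList cs) "A").getD []).map
          (fun seg => (PySem.Str.count seg "o" : Int))) id).getD 0
  rw [hcounts, coreEq cs]
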